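-- pv_equiv track=rewrite | github.com/wusatosi/tt-metal | tests/tt_eager/python_api_testing/unit_testing/misc/test_matmul_dram_sharded.py | find_max_subblock
-- ===== SOURCE A (Python) =====
-- def find_max_subblock(out_block_h, out_block_w):
--     max_product = 0
--     best_h = 1
--     best_w = 1
--
--     for h in range(1, out_block_h + 1):
--         if out_block_h % h == 0:
--             for w in range(1, out_block_w + 1):
--                 if out_block_w % w == 0 and h * w <= 8:
--                     if h * w > max_product:
--                         max_product = h * w
--                         best_h = h
--                         best_w = w
--     if out_block_w > best_w:
--         best_h = 1
--     return best_h, best_w, max_product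
-- ===== SOURCE B (Python) =====
-- def find_max_subblock(out_block_h, out_block_w):
--     # Search candidate products p = 8..1 descending; the first p admitting a
--     # factorisation p = h*w with h | out_block_h, w | out_block_w (within bounds)
--     # is the maximum product, and ascending h gives A's tie-break.
--     best_h, best_w, max_product = 1, 1, 0
--     for p in range(8, 0, -1):
--         hit = None
--         for h in range(1, p + 1):
--             if p % h == 0:
--                 w = p // h
--                 if h <= out_block_h and out_block_h % h == 0 and w <= out_block_w and out_block_w % w == 0:
--                     hit = (h, w)
--                     break
--         if hit is not None:
--             best_h, best_w = hit
--             max_product = p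
--             break
--     if out_block_w > best_w:
--         best_h = 1
--     return best_h, best_w, max_product
-- ===== Notes on version B (the rewrite author's own statement) =====
-- stated objective: faster
-- what changed: Instead of scanning the full h x w grid up to out_block_h*out_block_w, B enumerates the nine candidate products p=8..1 in descending order and returns on the first p factorisable as h*w with the divisibility/bound checks, so the work is a constant <= 36 checks regardless of input size.
import Mathlib
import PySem

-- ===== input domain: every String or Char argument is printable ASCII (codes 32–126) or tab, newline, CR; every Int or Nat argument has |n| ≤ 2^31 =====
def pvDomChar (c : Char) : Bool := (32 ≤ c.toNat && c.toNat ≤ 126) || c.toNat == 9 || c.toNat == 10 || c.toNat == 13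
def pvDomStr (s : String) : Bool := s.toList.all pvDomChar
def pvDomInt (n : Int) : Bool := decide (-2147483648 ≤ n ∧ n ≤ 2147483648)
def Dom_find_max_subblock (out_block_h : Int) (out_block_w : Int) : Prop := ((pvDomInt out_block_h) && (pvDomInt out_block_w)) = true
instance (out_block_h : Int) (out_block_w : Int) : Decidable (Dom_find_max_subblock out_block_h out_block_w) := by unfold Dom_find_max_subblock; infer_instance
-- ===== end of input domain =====

-- B replaces A's scan of the whole out_block_h × out_block_w grid by a constant-size
-- search over candidate products p = 8..1 in descending order (first factorisation wins).

-- ===== PORT A =====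
def find_max_subblock (out_block_h : Int) (out_block_w : Int) : List Int :=
  let s := (PySem.List.pyRange 1 (out_block_h + 1) 1).foldl (fun st h =>
    if PySem.Int.mod out_block_h h == 0 then
      (PySem.List.pyRange 1 (out_block_w + 1) 1).foldl (fun st2 w =>
        if PySem.Int.mod out_block_w w == 0 && decide (h * w ≤ 8) then
          (if h * w > st2.2.2 then (h, w, h * w) else st2)
        else st2) st
    else st) ((1 : Int), (1 : Int), (0 : Int))
  let best_h : Int := if out_block_w > s.2.1 then 1 else s.1
  [best_h, s.2.1, s.2.2]

-- ===== PORT B =====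
-- inner 'for h … break' of Source B: first h with p % h == 0 whose (h, w = p//h) passes all checks
def altFindH (a : Int) (b : Int) (p : Int) : List Int → Option (Int × Int)
  | [] => none
  | h :: rest =>
    if PySem.Int.mod p h == 0 then
      let w := PySem.Int.floordiv p h
      if decide (h ≤ a) && (PySem.Int.mod a h == 0) && decide (w ≤ b) && (PySem.Int.mod b w == 0) then
        some (h, w)
      else altFindH a b p rest
    else altFindH a b p rest

-- outer 'for p in range(8, 0, -1) … break' of Source B
def altLoop (a : Int) (b : Int) : List Int → Int × Int × Int
  | [] => ((1 : Int), (1 : Int), (0 : Int))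
  | p :: rest =>
    match altFindH a b p (PySem.List.pyRange 1 (p + 1) 1) with
    | some hw => (hw.1, hw.2, p)
    | none => altLoop a b rest

def find_max_subblock_alt (out_block_h : Int) (out_block_w : Int) : List Int :=
  let s := altLoop out_block_h out_block_w (PySem.List.pyRange 8 0 (-1))
  let best_h : Int := if out_block_w > s.2.1 then 1 else s.1
  [best_h, s.2.1, s.2.2]

-- ===== PRECONDITION & SPEC =====
def Spec_find_max_subblock (out_block_h : Int) (out_block_w : Int) (out : List Int) : Prop := out = find_max_subblock_alt out_block_h out_block_w
instance (out_block_h : Int) (out_block_w : Int) (out : List Int) : Decidable (Spec_find_max_subblock out_block_h out_block_w out) := by unfold Spec_find_max_subblock; infer_instance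

-- ===== CLAIM (what is proved, stated in full; the proofs are below) =====
def Claim_equal_find_max_subblock : Prop := ∀ (out_block_h : Int) (out_block_w : Int), Dom_find_max_subblock out_block_h out_block_w → Spec_find_max_subblock out_block_h out_block_w (find_max_subblock out_block_h out_block_w)

-- ===== LEMMAS AND PROOFS =====

-- value of a candidate pair, the state update of A's inner loop, and the "first pair
-- attaining the maximal value" selector that characterises A's fold
def pvVal (x : Int × Int) : Int := x.1 * x.2

def pvUpd (st : Int × Int × Int) (x : Int × Int) : Int × Int × Int :=
  if pvVal x > st.2.2 then (x.1, x.2, pvVal x) else st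

def pvPick : List (Int × Int) → Option (Int × Int)
  | [] => none
  | x :: t =>
    match pvPick t with
    | none => some x
    | some y => if pvVal y > pvVal x then some y else some x

def pvMax (l : List (Int × Int)) : Int := (l.map pvVal).foldl max 0

def pvL8 : List Int := [1, 2, 3, 4, 5, 6, 7, 8]
def pvPL : List (Int × Int) := pvL8.flatMap (fun h => pvL8.map (fun w => (h, w)))
-- candidate pairs with value ≤ 8, in A's lexicographic scan order
def pvAL : List (Int × Int) := [(1,1),(1,2),(1,3),(1,4),(1,5),(1,6),(1,7),(1,8),(2,1),(2,2),(2,3),(2,4),(3,1),(3,2),(4,1),(4,2),(5,1),(6,1),(7,1),(8,1)]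
-- the same pairs in B's scan order: value descending, h ascending within a value
def pvBL : List (Int × Int) := [(1,8),(2,4),(4,2),(8,1),(1,7),(7,1),(1,6),(2,3),(3,2),(6,1),(1,5),(5,1),(1,4),(2,2),(4,1),(1,3),(3,1),(1,2),(2,1),(1,1)]

def pvP (a : Int) (h : Int) : Bool := decide (h ≤ a) && (PySem.Int.mod a h == 0)
def pvPQ (a : Int) (b : Int) (x : Int × Int) : Bool := pvP a x.1 && pvP b x.2

-- a fold all of whose steps are the identity does nothing
theorem pv_foldl_id {α β : Type} (l : List α) (f : β → α → β) (st : β)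
    (h : ∀ s x, x ∈ l → f s x = s) : l.foldl f st = st := by
  induction l generalizing st with
  | nil => rfl
  | cons x t ih =>
    rw [List.foldl_cons, h st x (List.mem_cons_self)]
    exact ih st (fun s y hy => h s y (List.mem_cons_of_mem _ hy))

theorem pv_mem_L8 : ∀ i ∈ pvL8, 1 ≤ i ∧ i ≤ 8 := by decide

-- A's 'for i in range(1, n+1)' fold equals a guarded fold over the fixed list [1..8]
theorem pv_fold_range8 {σ : Type} (n : Int) (f g : σ → Int → σ) (st : σ)
    (hbig : ∀ s i, 9 ≤ i → f s i = s)
    (hout : ∀ s i, n < i → g s i = s)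
    (hagree : ∀ s i, 1 ≤ i → i ≤ n → i ≤ 8 → f s i = g s i) :
    (PySem.List.pyRange 1 (n + 1) 1).foldl f st = pvL8.foldl g st := by
  by_cases h8 : 8 ≤ n
  · have hsplit : PySem.List.pyRange 1 (n + 1) 1
        = PySem.List.pyRange 1 9 1 ++ PySem.List.pyRange 9 (n + 1) 1 :=
      PySem.List.pyRange_one_append 1 9 (n + 1) (by omega) (by omega)
    have h19 : PySem.List.pyRange 1 9 1 = pvL8 := by decide
    rw [hsplit, List.foldl_append, h19]
    rw [pv_foldl_id (PySem.List.pyRange 9 (n + 1) 1) f _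
      (fun s i hi => hbig s i ((PySem.List.mem_pyRange_one.1 hi).1))]
    exact PySem.List.foldl_congr_mem _ _ _ _ (fun s i hi =>
      hagree s i (pv_mem_L8 i hi).1 (le_trans (pv_mem_L8 i hi).2 h8) (pv_mem_L8 i hi).2)
  · by_cases h0 : 0 ≤ n
    · have h19 : pvL8 = PySem.List.pyRange 1 9 1 := by decide
      have hsplit : PySem.List.pyRange 1 9 1
          = PySem.List.pyRange 1 (n + 1) 1 ++ PySem.List.pyRange (n + 1) 9 1 :=
        PySem.List.pyRange_one_append 1 (n + 1) 9 (by omega) (by omega)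
      rw [h19, hsplit, List.foldl_append]
      rw [pv_foldl_id (PySem.List.pyRange (n + 1) 9 1) g _
        (fun s i hi => hout s i (by have := (PySem.List.mem_pyRange_one.1 hi).1; omega))]
      exact PySem.List.foldl_congr_mem _ _ _ _ (fun s i hi => by
        have hm := PySem.List.mem_pyRange_one.1 hi
        exact hagree s i hm.1 (by omega) (by omega))
    · rw [PySem.List.pyRange_one_eq_nil (by omega)]
      exact (pv_foldl_id pvL8 g st (fun s i hi =>
        hout s i (by have := (pv_mem_L8 i hi).1; omega))).symm

-- A's double loop collapses to a filtered fold over the 20 candidate pairs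
theorem pv_coreA (a b : Int) :
    (PySem.List.pyRange 1 (a + 1) 1).foldl (fun st h =>
      if PySem.Int.mod a h == 0 then
        (PySem.List.pyRange 1 (b + 1) 1).foldl (fun st2 w =>
          if PySem.Int.mod b w == 0 && decide (h * w ≤ 8) then
            (if h * w > st2.2.2 then (h, w, h * w) else st2)
          else st2) st
      else st) ((1 : Int), (1 : Int), (0 : Int))
    = (pvAL.filter (pvPQ a b)).foldl pvUpd ((1 : Int), (1 : Int), (0 : Int)) := by
  rw [pv_fold_range8 a _ (fun st h =>
        if pvP a h then
          pvL8.foldl (fun st2 w =>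
            if pvP b w && decide (h * w ≤ 8) then pvUpd st2 (h, w) else st2) st
        else st) _
    (by -- hbig : rows h ≥ 9 do nothing
      intro s i hi
      have hinner : (PySem.List.pyRange 1 (b + 1) 1).foldl (fun st2 w =>
          if PySem.Int.mod b w == 0 && decide (i * w ≤ 8) then
            (if i * w > st2.2.2 then (i, w, i * w) else st2)
          else st2) s = s := by
        refine pv_foldl_id _ _ _ (fun s2 w hw => ?_)
        have hw1 : 1 ≤ w := (PySem.List.mem_pyRange_one.1 hw).1
        have : ¬ (i * w ≤ 8) := by nlinarith
        simp [this]
      simp only [hinner, ite_self])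
    (by -- hout : the guarded row step is identity beyond a
      intro s i hi
      simp [pvP, show ¬ (i ≤ a) by omega])
    (by -- hagree : rows 1..min(a,8) agree, with the inner loop truncated likewise
      intro s i h1 hn h8
      dsimp only
      have hP : pvP a i = (PySem.Int.mod a i == 0) := by
        simp [pvP, show i ≤ a from hn]
      rw [hP]
      by_cases hm : (PySem.Int.mod a i == 0) = true
      · simp only [hm, if_pos]
        refine pv_fold_range8 b _ _ s ?_ ?_ ?_
        · intro s2 w hw
          have : ¬ (i * w ≤ 8) := by nlinarith
          simp [this]
        · intro s2 w hw
          simp [pvP, show ¬ (w ≤ b) by omega]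
        · intro s2 w hw1 hwb hw8
          simp [pvP, pvUpd, pvVal, show w ≤ b from hwb]
      · simp [hm])]
  have hstep : (fun (st : Int × Int × Int) h =>
        if pvP a h then
          pvL8.foldl (fun st2 w =>
            if pvP b w && decide (h * w ≤ 8) then pvUpd st2 (h, w) else st2) st
        else st)
      = (fun st h => pvL8.foldl (fun st2 w =>
          if pvP a h && (pvP b w && decide (h * w ≤ 8)) then pvUpd st2 (h, w) else st2) st) := by
    funext st h
    dsimp only
    by_cases hp : pvP a h = true
    · simp [hp]
    · have hpf : pvP a h = false := by simpa using hp
      simp only [hpf, Bool.false_and, Bool.false_eq_true, if_false]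
      exact (pv_foldl_id _ _ _ (fun s2 w hw => rfl)).symm
  rw [hstep]
  have h3 : pvPL.foldl (fun st2 x =>
        if pvP a x.1 && (pvP b x.2 && decide (x.1 * x.2 ≤ 8)) then pvUpd st2 x else st2)
        ((1 : Int), (1 : Int), (0 : Int))
      = pvL8.foldl (fun st h => pvL8.foldl (fun st2 w =>
          if pvP a h && (pvP b w && decide (h * w ≤ 8)) then pvUpd st2 (h, w) else st2) st)
        ((1 : Int), (1 : Int), (0 : Int)) := by
    rw [pvPL, List.foldl_flatMap]
    simp only [List.foldl_map]
  rw [← h3, PySem.List.foldl_if_eq_foldl_filter]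
  congr 1
  have hAL : pvAL = pvPL.filter (fun x => decide (x.1 * x.2 ≤ 8)) := by decide
  rw [hAL, List.filter_filter]
  exact List.filter_congr (fun x hx => by
    simp [pvPQ, Bool.and_assoc])

-- the first-strict-improvement fold is determined by pvPick
theorem pv_fold_char (l : List (Int × Int)) (st : Int × Int × Int) :
    l.foldl pvUpd st =
      match pvPick l with
      | none => st
      | some y => if pvVal y > st.2.2 then (y.1, y.2, pvVal y) else st := by
  induction l generalizing st with
  | nil => rfl
  | cons x t ih =>
    rw [List.foldl_cons, ih]
    cases hp : pvPick t with
    | none => simp only [pvPick, hp, pvUpd]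
    | some y =>
      simp only [pvPick, hp, pvUpd]
      split_ifs <;> simp_all <;> omega

theorem pv_pick_mem (l : List (Int × Int)) (y : Int × Int) (h : pvPick l = some y) : y ∈ l := by
  induction l with
  | nil => simp [pvPick] at h
  | cons x t ih =>
    cases hp : pvPick t with
    | none =>
      simp only [pvPick, hp] at h
      cases h
      exact List.mem_cons_self
    | some z =>
      simp only [pvPick, hp] at h
      split_ifs at h
      · cases h
        exact List.mem_cons_of_mem _ (ih hp)
      · cases h
        exact List.mem_cons_self

theorem pv_foldl_max_swap (l : List Int) : ∀ (c d : Int),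
    l.foldl max (max c d) = max c (l.foldl max d) := by
  induction l with
  | nil => intro c d; rfl
  | cons e t ih =>
    intro c d
    rw [List.foldl_cons, List.foldl_cons, max_assoc, ih]

theorem pv_max_cons (x : Int × Int) (t : List (Int × Int)) :
    pvMax (x :: t) = max (pvVal x) (pvMax t) := by
  show (List.map pvVal (x :: t)).foldl max 0 = _
  rw [List.map_cons, List.foldl_cons, max_comm, pv_foldl_max_swap]
  rfl

theorem pv_pick_none (l : List (Int × Int)) (h : pvPick l = none) : l = [] := by
  cases l with
  | nil => rfl
  | cons x t =>
    exfalso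
    cases hp : pvPick t <;> simp [pvPick, hp] at h
    split at h <;> simp at h

-- pvPick returns the first element attaining the maximal value
theorem pv_pick_eq_find (l : List (Int × Int)) (hpos : ∀ x ∈ l, 1 ≤ pvVal x) :
    pvPick l = l.find? (fun x => pvVal x == pvMax l) := by
  induction l with
  | nil => rfl
  | cons x t ih =>
    have hx1 : 1 ≤ pvVal x := hpos x List.mem_cons_self
    have ih' := ih (fun z hz => hpos z (List.mem_cons_of_mem _ hz))
    cases hp : pvPick t with
    | none =>
      have ht : t = [] := pv_pick_none t hp
      subst ht
      simp only [pvPick, pv_max_cons, List.find?]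
      have : pvMax ([] : List (Int × Int)) = 0 := rfl
      rw [this]
      have hmx : max (pvVal x) 0 = pvVal x := by omega
      rw [hmx]
      simp
    | some y =>
      have hyM : pvVal y = pvMax t := by
        have := List.find?_some (ih' ▸ hp)
        simpa using this
      by_cases hgt : pvVal y > pvVal x
      · have hMc : pvMax (x :: t) = pvMax t := by rw [pv_max_cons]; omega
        simp only [pvPick, hp, if_pos hgt, hMc]
        rw [List.find?_cons_of_neg (by simp; omega), ← ih']
        exact hp.symm
      · have hMc : pvMax (x :: t) = pvVal x := by rw [pv_max_cons]; omega
        simp only [pvPick, hp, if_neg hgt, hMc]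
        rw [List.find?_cons_of_pos (by simp)]

theorem pv_find_filter {α : Type} (l : List α) (q p : α → Bool) :
    (l.filter q).find? p = l.find? (fun x => q x && p x) := by
  induction l with
  | nil => rfl
  | cons x t ih =>
    by_cases hq : q x = true
    · by_cases hp : p x = true
      · rw [List.filter_cons, if_pos hq, List.find?_cons_of_pos hp,
          List.find?_cons_of_pos (by simp [hq, hp])]
      · rw [List.filter_cons, if_pos hq, List.find?_cons_of_neg hp,
          List.find?_cons_of_neg (by simp [hp]), ih]
    · rw [List.filter_cons, if_neg hq, List.find?_cons_of_neg (by simp [hq]), ih]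

theorem pv_foldl_max_le (l : List Int) : ∀ (i c : Int), i ≤ c → (∀ v ∈ l, v ≤ c) →
    l.foldl max i ≤ c := by
  induction l with
  | nil => intro i c hi _; exact hi
  | cons x t ih =>
    intro i c hi hv
    rw [List.foldl_cons]
    exact ih _ _ (max_le hi (hv x List.mem_cons_self)) (fun v hvm => hv v (List.mem_cons_of_mem _ hvm))

theorem pv_max_le (l : List (Int × Int)) (h : ∀ x ∈ l, pvVal x ≤ 8) : pvMax l ≤ 8 := by
  refine pv_foldl_max_le _ 0 8 (by omega) ?_
  intro v hv
  rcases List.mem_map.1 hv with ⟨x, hx, rfl⟩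
  exact h x hx

theorem pv_max_nonneg (l : List (Int × Int)) : 0 ≤ pvMax l := by
  have := pv_foldl_max_swap (l.map pvVal) 0 0
  simp only [max_self] at this
  rw [pvMax, this]
  omega

-- within one value class the lex order and the descending order agree
theorem pv_class_find (pq : Int × Int → Bool) (p : Int) (h0 : 0 ≤ p) (h8 : p ≤ 8) :
    pvAL.find? (fun x => pq x && (pvVal x == p)) = pvBL.find? (fun x => pq x && (pvVal x == p)) := by
  interval_cases p <;> simp [pvAL, pvBL, pvVal, List.find?]

-- on a value-descending list, the first accepted element is the first maximal one
theorem pv_desc_find (l : List (Int × Int)) (pq : Int × Int → Bool)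
    (hdesc : l.Pairwise (fun x y => pvVal y ≤ pvVal x))
    (hpos : ∀ x ∈ l, 1 ≤ pvVal x) :
    (match l.find? pq with
      | none => ((1 : Int), (1 : Int), (0 : Int))
      | some y => (y.1, y.2, pvVal y)) =
    (match pvPick (l.filter pq) with
      | none => ((1 : Int), (1 : Int), (0 : Int))
      | some y => if pvVal y > 0 then (y.1, y.2, pvVal y) else ((1 : Int), (1 : Int), (0 : Int))) := by
  induction l with
  | nil => rfl
  | cons x t ih =>
    have hx := List.pairwise_cons.1 hdesc
    by_cases hq : pq x = true
    · rw [List.find?_cons_of_pos hq, List.filter_cons, if_pos hq]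
      have hx1 : 1 ≤ pvVal x := hpos x List.mem_cons_self
      cases hp : pvPick (t.filter pq) with
      | none =>
        simp only [pvPick, hp]
        rw [if_pos (by omega)]
      | some z =>
        have hz : pvVal z ≤ pvVal x :=
          hx.1 z (List.mem_of_mem_filter (pv_pick_mem _ _ hp))
        simp only [pvPick, hp, if_neg (by omega : ¬ pvVal z > pvVal x)]
        rw [if_pos (by omega)]
    · rw [List.find?_cons_of_neg hq, List.filter_cons, if_neg hq]
      exact ih hx.2 (fun z hz => hpos z (List.mem_cons_of_mem _ hz))

-- B-side: the guard of altFindH, and the candidate pairs one product contributes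
def pvOK (a : Int) (b : Int) (x : Int × Int) : Bool :=
  decide (x.1 ≤ a) && (PySem.Int.mod a x.1 == 0) && decide (x.2 ≤ b) && (PySem.Int.mod b x.2 == 0)

def pvClass (p : Int) : List (Int × Int) :=
  (PySem.List.pyRange 1 (p + 1) 1).filterMap
    (fun h => if PySem.Int.mod p h == 0 then some (h, PySem.Int.floordiv p h) else none)

theorem pv_findH_eq (a b p : Int) (hs : List Int) :
    altFindH a b p hs
      = (hs.filterMap (fun h =>
          if PySem.Int.mod p h == 0 then some (h, PySem.Int.floordiv p h) else none)).find?
          (pvOK a b) := by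
  induction hs with
  | nil => rfl
  | cons h t ih =>
    by_cases hm : (PySem.Int.mod p h == 0) = true
    · rw [List.filterMap_cons]
      simp only [hm, if_pos]
      by_cases hok : pvOK a b (h, PySem.Int.floordiv p h) = true
      · rw [List.find?_cons_of_pos hok]
        simp only [altFindH, hm, if_pos]
        rw [if_pos (by simpa [pvOK] using hok)]
      · rw [List.find?_cons_of_neg hok]
        simp only [altFindH, hm, if_pos]
        rw [if_neg (by simpa [pvOK] using hok)]
        exact ih
    · rw [List.filterMap_cons]
      simp only [hm]
      simp only [altFindH, hm]
      simpa using ih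

theorem pv_altLoop (a b : Int) (ps : List Int) (hpos : ∀ p ∈ ps, 1 ≤ p) :
    altLoop a b ps =
      match (ps.flatMap pvClass).find? (pvOK a b) with
      | none => ((1 : Int), (1 : Int), (0 : Int))
      | some y => (y.1, y.2, pvVal y) := by
  induction ps with
  | nil => rfl
  | cons p t ih =>
    rw [List.flatMap_cons, List.find?_append]
    cases hc : (pvClass p).find? (pvOK a b) with
    | none =>
      simp only [Option.none_or]
      rw [← ih (fun q hq => hpos q (List.mem_cons_of_mem _ hq))]
      simp only [altLoop, pv_findH_eq a b p]
      rw [show (PySem.List.pyRange 1 (p + 1) 1).filterMap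
          (fun h => if PySem.Int.mod p h == 0 then some (h, PySem.Int.floordiv p h) else none)
          = pvClass p from rfl, hc]
    | some y =>
      simp only [Option.some_or]
      have hyv : pvVal y = p := by
        have hmem := List.mem_of_find?_eq_some hc
        rcases List.mem_filterMap.1 hmem with ⟨h, hh, hsome⟩
        by_cases hm : (PySem.Int.mod p h == 0) = true
        · rw [if_pos hm] at hsome
          have hmod : PySem.Int.mod p h = 0 := by simpa using hm
          have hlaw := PySem.Int.floordiv_mul_add_mod p h
          rw [hmod, add_zero] at hlaw
          have : y = (h, PySem.Int.floordiv p h) := by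
            cases hsome; rfl
          rw [this]
          show h * PySem.Int.floordiv p h = p
          rw [mul_comm]
          exact hlaw
        · rw [if_neg hm] at hsome; cases hsome
      simp only [altLoop, pv_findH_eq a b p]
      rw [show (PySem.List.pyRange 1 (p + 1) 1).filterMap
          (fun h => if PySem.Int.mod p h == 0 then some (h, PySem.Int.floordiv p h) else none)
          = pvClass p from rfl, hc, hyv]

-- B's loop is the first accepted pair of the descending list
theorem pv_coreB (a b : Int) :
    altLoop a b (PySem.List.pyRange 8 0 (-1)) =
      match pvBL.find? (pvPQ a b) with
      | none => ((1 : Int), (1 : Int), (0 : Int))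
      | some y => (y.1, y.2, pvVal y) := by
  have hr : PySem.List.pyRange 8 0 (-1) = [8, 7, 6, 5, 4, 3, 2, 1] := by decide
  have hfl : (([8, 7, 6, 5, 4, 3, 2, 1] : List Int).flatMap pvClass) = pvBL := by decide
  have hfun : pvOK a b = pvPQ a b := by
    funext x
    simp [pvOK, pvPQ, pvP, Bool.and_assoc]
  rw [hr, pv_altLoop a b _ (by decide), hfl, hfun]

theorem pv_main (a b : Int) :
    (PySem.List.pyRange 1 (a + 1) 1).foldl (fun st h =>
      if PySem.Int.mod a h == 0 then
        (PySem.List.pyRange 1 (b + 1) 1).foldl (fun st2 w =>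
          if PySem.Int.mod b w == 0 && decide (h * w ≤ 8) then
            (if h * w > st2.2.2 then (h, w, h * w) else st2)
          else st2) st
      else st) ((1 : Int), (1 : Int), (0 : Int))
    = altLoop a b (PySem.List.pyRange 8 0 (-1)) := by
  rw [pv_coreA, pv_coreB]
  have hposAL : ∀ x ∈ pvAL, 1 ≤ pvVal x := by decide
  have hle8AL : ∀ x ∈ pvAL, pvVal x ≤ 8 := by decide
  have hposBL : ∀ x ∈ pvBL, 1 ≤ pvVal x := by decide
  have hposALf : ∀ x ∈ pvAL.filter (pvPQ a b), 1 ≤ pvVal x :=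
    fun x hx => hposAL x (List.mem_of_mem_filter hx)
  have hposBLf : ∀ x ∈ pvBL.filter (pvPQ a b), 1 ≤ pvVal x :=
    fun x hx => hposBL x (List.mem_of_mem_filter hx)
  have hperm : pvAL.Perm pvBL := by decide
  have hM : pvMax (pvAL.filter (pvPQ a b)) = pvMax (pvBL.filter (pvPQ a b)) := by
    have hpf : (pvAL.filter (pvPQ a b)).Perm (pvBL.filter (pvPQ a b)) := hperm.filter _
    have hpm := hpf.map pvVal
    haveI : RightCommutative (fun (s v : Int) => max s v) :=
      ⟨fun b x y => max_right_comm b x y⟩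
    exact hpm.foldl_eq 0
  have hM0 : 0 ≤ pvMax (pvAL.filter (pvPQ a b)) := pv_max_nonneg _
  have hMle : pvMax (pvAL.filter (pvPQ a b)) ≤ 8 :=
    pv_max_le _ (fun x hx => hle8AL x (List.mem_of_mem_filter hx))
  rw [pv_fold_char]
  rw [pv_pick_eq_find _ hposALf, pv_find_filter, pv_class_find (pvPQ a b) _ hM0 hMle, hM,
    ← pv_find_filter, ← pv_pick_eq_find _ hposBLf]
  have hdesc : pvBL.Pairwise (fun x y => pvVal y ≤ pvVal x) := by decide
  exact (pv_desc_find pvBL (pvPQ a b) hdesc hposBL).symm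

-- ===== VERDICT (by name: the statement is the Claim_ definition above) =====
theorem find_max_subblock_spec : Claim_equal_find_max_subblock := by
  intro a b _
  unfold Spec_find_max_subblock find_max_subblock find_max_subblock_alt
  rw [pv_main a b]
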